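-- pv_equiv track=rewrite | github.com/wasumayan/Heimdall | hound/commands/agent.py | _format_model_sig
-- ===== SOURCE A (Python) =====
-- def _format_model_sig(models_cfg: dict, key: str, fallbacks: list[str] | None = None) -> str:
--     """Return provider/model for a model profile key or its fallbacks."""
--     fallbacks = fallbacks or []
--     if key in models_cfg:
--         mc = models_cfg.get(key) or {}
--         return f"{mc.get('provider','unknown')}/{mc.get('model','unknown')}"
--     for alt in fallbacks:
--         if alt in models_cfg:
--             mc = models_cfg.get(alt) or {}
--             return f"{mc.get('provider','unknown')}/{mc.get('model','unknown')}"
--     return "unknown/unknown"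
-- ===== SOURCE B (Python) =====
-- def _format_model_sig(models_cfg: dict, key: str, fallbacks: list[str] | None = None) -> str:
--     """Return provider/model for a model profile key or its fallbacks."""
--     chain = [key, *(fallbacks or [])]
--     n = len(chain)
--     rank = {}
--     for i, c in enumerate(chain):
--         rank.setdefault(c, i)
--     best_r, best = n, None
--     for k, mc in models_cfg.items():
--         r = rank.get(k, n)
--         if r < best_r:
--             best_r, best = r, mc
--     if best_r == n:
--         return "unknown/unknown"
--     mc = best or {}
--     return f"{mc.get('provider','unknown')}/{mc.get('model','unknown')}"
-- ===== Notes on version B (the rewrite author's own statement) =====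
-- stated objective: alternative
-- what changed: Instead of scanning the candidate chain and testing membership per candidate, B builds a rank table (first position of each candidate in [key, *fallbacks]) and makes one argmin pass over the config's entries, keeping the entry whose key has the smallest rank, formatting it (or the default when no key is ranked).
import Mathlib
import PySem

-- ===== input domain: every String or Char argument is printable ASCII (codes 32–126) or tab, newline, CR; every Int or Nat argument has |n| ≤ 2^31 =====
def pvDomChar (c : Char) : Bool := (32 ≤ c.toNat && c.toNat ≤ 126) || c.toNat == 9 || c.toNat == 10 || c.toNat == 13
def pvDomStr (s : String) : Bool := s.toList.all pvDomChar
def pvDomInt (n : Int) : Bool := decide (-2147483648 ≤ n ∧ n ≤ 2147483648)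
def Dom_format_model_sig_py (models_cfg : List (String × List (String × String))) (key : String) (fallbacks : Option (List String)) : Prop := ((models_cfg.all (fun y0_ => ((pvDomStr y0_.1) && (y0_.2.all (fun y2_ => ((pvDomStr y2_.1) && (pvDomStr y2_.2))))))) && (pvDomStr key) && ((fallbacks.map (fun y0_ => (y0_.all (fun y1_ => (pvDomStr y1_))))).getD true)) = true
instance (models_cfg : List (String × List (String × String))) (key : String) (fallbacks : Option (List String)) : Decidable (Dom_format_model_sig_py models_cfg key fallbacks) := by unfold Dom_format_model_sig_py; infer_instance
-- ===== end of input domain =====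

-- B replaces A's candidate-chain scan by a single argmin pass over the config entries, keeping the entry whose key sits earliest in [key, *fallbacks] (objective: alternative).


-- ===== PORT A =====
-- A's fallback loop, one step per `alt`; the format expression is duplicated, as in A.
def pvLoopA (models_cfg : List (String × List (String × String))) : List String → String
  | [] => "unknown/unknown"
  | alt :: rest =>
    if models_cfg.any (fun p => p.1 == alt) then
      let mc := (List.lookup alt models_cfg).getD []
      ((List.lookup "provider" mc).getD "unknown") ++ "/" ++ ((List.lookup "model" mc).getD "unknown")
    else pvLoopA models_cfg rest

def format_model_sig_py (models_cfg : List (String × List (String × String))) (key : String) (fallbacks : Option (List String)) : String :=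
  let fbs := match fallbacks with | none => [] | some l => l   -- fallbacks or []
  if models_cfg.any (fun p => p.1 == key) then
    let mc := (List.lookup key models_cfg).getD []             -- .get(key) or {}
    ((List.lookup "provider" mc).getD "unknown") ++ "/" ++ ((List.lookup "model" mc).getD "unknown")
  else
    pvLoopA models_cfg fbs

-- ===== PORT B =====
-- rank.setdefault(c, i) over enumerate(chain): keep the FIRST position of each candidate
def pvRankMap (chain : List String) : List (String × Nat) :=
  chain.zipIdx.foldl (fun d ci => if (List.lookup ci.1 d).isSome then d else d ++ [ci]) []

-- the body of B's loop over models_cfg.items(), state = (best_r, best); r = rank.get(k, n)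
def pvStep (rank : List (String × Nat)) (n : Nat) (acc : Nat × List (String × String)) (p : String × List (String × String)) : Nat × List (String × String) :=
  let r := (List.lookup p.1 rank).getD n
  if r < acc.1 then (r, p.2) else acc

def format_model_sig_py_alt (models_cfg : List (String × List (String × String))) (key : String) (fallbacks : Option (List String)) : String :=
  let chain := key :: fallbacks.getD []                        -- [key, *(fallbacks or [])]
  let n := chain.length
  let rank := pvRankMap chain
  let best := models_cfg.foldl (pvStep rank n) (n, [])         -- argmin pass over the config
  if best.1 == n then "unknown/unknown"
  else
    let mc := best.2                                           -- `best or {}`: identity on dict-typed values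
    ((List.lookup "provider" mc).getD "unknown") ++ "/" ++ ((List.lookup "model" mc).getD "unknown")

-- ===== PRECONDITION & SPEC =====
def Spec_format_model_sig_py (models_cfg : List (String × List (String × String))) (key : String) (fallbacks : Option (List String)) (out : String) : Prop := out = format_model_sig_py_alt models_cfg key fallbacks
instance (models_cfg : List (String × List (String × String))) (key : String) (fallbacks : Option (List String)) (out : String) : Decidable (Spec_format_model_sig_py models_cfg key fallbacks out) := by unfold Spec_format_model_sig_py; infer_instance

-- ===== CLAIM =====
def Claim_equal_format_model_sig_py : Prop := ∀ (models_cfg : List (String × List (String × String))) (key : String) (fallbacks : Option (List String)), Dom_format_model_sig_py models_cfg key fallbacks → Spec_format_model_sig_py models_cfg key fallbacks (format_model_sig_py models_cfg key fallbacks)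

-- ===== LEMMAS AND PROOFS =====
def pvFmt (mc : List (String × String)) : String :=
  ((List.lookup "provider" mc).getD "unknown") ++ "/" ++ ((List.lookup "model" mc).getD "unknown")

-- A in "first candidate found in chain" form
def pvAform (l : List (String × List (String × String))) (chain : List String) : String :=
  match chain.find? (fun c => l.any (fun p => p.1 == c)) with
  | some c => pvFmt ((List.lookup c l).getD [])
  | none => "unknown/unknown"

-- proof-side rank function and step: rank via first index in the chain
def pvRk (chain : List String) (k : String) : Nat :=
  (PySem.List.index? chain k).getD chain.length

def pvStepI (chain : List String) (acc : Nat × List (String × String)) (p : String × List (String × String)) : Nat × List (String × String) :=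
  if pvRk chain p.1 < acc.1 then (pvRk chain p.1, p.2) else acc

theorem pvLoopA_eq_find (models_cfg : List (String × List (String × String))) (fbs : List String) :
    pvLoopA models_cfg fbs = pvAform models_cfg fbs := by
  induction fbs with
  | nil => rfl
  | cons alt rest ih =>
    by_cases h : models_cfg.any (fun p => p.1 == alt)
    · simp [pvLoopA, pvAform, List.find?, h, pvFmt]
    · simp only [Bool.not_eq_true] at h
      simp [pvLoopA, pvAform, List.find?, h, ih]

theorem A_eq_Aform (models_cfg : List (String × List (String × String))) (key : String) (fallbacks : Option (List String)) :
    format_model_sig_py models_cfg key fallbacks = pvAform models_cfg (key :: fallbacks.getD []) := by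
  unfold format_model_sig_py
  by_cases h : models_cfg.any (fun p => p.1 == key)
  · simp [pvAform, List.find?, h, pvFmt]
  · simp only [Bool.not_eq_true] at h
    simp [pvAform, List.find?, h]
    rw [pvLoopA_eq_find]
    cases fallbacks <;> rfl

-- the rank map built by setdefault looks up to the first index in the chain
theorem lookup_append_single (k c : String) (i : Nat) (d : List (String × Nat)) :
    List.lookup k (d ++ [(c, i)]) = (List.lookup k d).or (if k == c then some i else none) := by
  induction d with
  | nil => cases h : k == c <;> simp [List.lookup, h]
  | cons p tl ih => cases hp : k == p.1 <;> simp [List.lookup, hp, ih]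

theorem map_shift (i : Nat) (o : Option Nat) :
    Option.map (fun x => x + (i + 1)) o = Option.map (fun x => x + i) (Option.map (fun x => x + 1) o) := by
  cases o with
  | none => rfl
  | some v => simp; omega

theorem lookup_rank_aux (k : String) (tl : List String) : ∀ (i : Nat) (d : List (String × Nat)),
    List.lookup k ((tl.zipIdx i).foldl (fun d ci => if (List.lookup ci.1 d).isSome then d else d ++ [ci]) d) =
      (List.lookup k d).or ((PySem.List.index? tl k).map (· + i)) := by
  induction tl with
  | nil => intro i d; simp
  | cons c tl ih =>
    intro i d
    rw [List.zipIdx_cons]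
    simp only [List.foldl_cons]
    by_cases hs : (List.lookup c d).isSome
    · rw [if_pos hs, ih]
      by_cases hk : k = c
      · subst hk
        obtain ⟨v, hv⟩ := Option.isSome_iff_exists.mp hs
        simp [hv]
      · rw [PySem.List.index?_cons_of_ne tl (Ne.symm hk), ← map_shift]
    · rw [if_neg hs, ih, lookup_append_single]
      by_cases hk : k = c
      · subst hk
        have hs' : List.lookup k d = none := by
          cases h : List.lookup k d with
          | none => rfl
          | some v => rw [h] at hs; simp at hs
        rw [PySem.List.index?_cons_self]
        simp [hs']
      · have hbeq : (k == c) = false := by simp [hk]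
        rw [PySem.List.index?_cons_of_ne tl (Ne.symm hk), ← map_shift]
        simp [hbeq]

theorem lookup_rankMap (chain : List String) (k : String) :
    List.lookup k (pvRankMap chain) = PySem.List.index? chain k := by
  unfold pvRankMap
  rw [lookup_rank_aux k chain 0 []]
  cases PySem.List.index? chain k <;> simp

theorem step_eq (chain : List String) :
    pvStep (pvRankMap chain) chain.length = pvStepI chain := by
  funext acc p
  simp [pvStep, pvStepI, pvRk, lookup_rankMap]

-- once best_r = 0, the fold is fixed
theorem foldl_fix_zero (chain : List String) (l : List (String × List (String × String))) (m : List (String × String)) :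
    l.foldl (pvStepI chain) (0, m) = (0, m) := by
  induction l with
  | nil => rfl
  | cons p tl ih => simpa [pvStepI] using ih

theorem rank_cons_self (c : String) (rest : List String) : pvRk (c :: rest) c = 0 := by
  unfold pvRk
  rw [PySem.List.index?_cons_self]
  rfl

theorem rank_cons_ne (c : String) (rest : List String) (k : String) (h : k ≠ c) :
    pvRk (c :: rest) k = pvRk rest k + 1 := by
  unfold pvRk
  rw [PySem.List.index?_cons_of_ne rest (Ne.symm h)]
  cases PySem.List.index? rest k <;> simp

theorem rank_lt_of_mem (chain : List String) (c : String) (h : c ∈ chain) :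
    pvRk chain c < chain.length := by
  obtain ⟨k, hk⟩ := Option.isSome_iff_exists.mp ((PySem.List.index?_isSome_iff chain c).mpr h)
  obtain ⟨hlt, -, -⟩ := PySem.List.getElem_of_index?_eq_some hk
  unfold pvRk
  rw [hk]
  simpa using hlt

-- a key equal to c exists: the fold ends at (0, first such entry's value)
theorem foldl_hit (c : String) (rest : List String) (l : List (String × List (String × String)))
    (q : String × List (String × String)) (hq : l.find? (fun p => p.1 == c) = some q) :
    ∀ (b : Nat) (m : List (String × String)), 0 < b →
      l.foldl (pvStepI (c :: rest)) (b, m) = (0, q.2) := by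
  induction l with
  | nil => simp at hq
  | cons p tl ih =>
    intro b m hb
    by_cases hp : p.1 = c
    · rw [List.find?_cons_of_pos (by simp [hp])] at hq
      cases hq
      simp only [List.foldl_cons, pvStepI, hp, rank_cons_self]
      rw [if_pos hb]
      exact foldl_fix_zero _ _ _
    · rw [List.find?_cons_of_neg (by simp [hp])] at hq
      have hr : pvRk (c :: rest) p.1 = pvRk rest p.1 + 1 := rank_cons_ne c rest p.1 hp
      simp only [List.foldl_cons, pvStepI, hr]
      split_ifs with hlt
      · exact ih hq _ _ (Nat.succ_pos _)
      · exact ih hq _ _ hb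

-- no key equal to c: ranks shift by one
theorem foldl_shift (c : String) (rest : List String) (l : List (String × List (String × String)))
    (hc : ∀ p ∈ l, p.1 ≠ c) :
    ∀ (b : Nat) (m : List (String × String)),
      l.foldl (pvStepI (c :: rest)) (b + 1, m) =
        ((l.foldl (pvStepI rest) (b, m)).1 + 1, (l.foldl (pvStepI rest) (b, m)).2) := by
  induction l with
  | nil => intro b m; rfl
  | cons p tl ih =>
    intro b m
    have hp : p.1 ≠ c := hc p (List.mem_cons_self ..)
    have hc' : ∀ q ∈ tl, q.1 ≠ c := fun q hq => hc q (List.mem_cons_of_mem _ hq)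
    have hr : pvRk (c :: rest) p.1 = pvRk rest p.1 + 1 := rank_cons_ne c rest p.1 hp
    simp only [List.foldl_cons, pvStepI, hr]
    by_cases hlt : pvRk rest p.1 < b
    · rw [if_pos (by omega), if_pos hlt]; exact ih hc' _ _
    · rw [if_neg (by omega), if_neg hlt]; exact ih hc' _ _

theorem find?_eq_lookup (c : String) (l : List (String × List (String × String)))
    (q : String × List (String × String)) (hq : l.find? (fun p => p.1 == c) = some q) :
    List.lookup c l = some q.2 := by
  induction l with
  | nil => simp at hq
  | cons p tl ih =>
    by_cases hp : p.1 = c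
    · rw [List.find?_cons_of_pos (by simp [hp])] at hq
      cases hq
      simp [List.lookup, hp]
    · rw [List.find?_cons_of_neg (by simp [hp])] at hq
      have : (c == p.1) = false := by
        simp only [beq_eq_false_iff_ne]
        exact fun h => hp h.symm
      simp [List.lookup, this, ih hq]

-- characterization of B's argmin fold by the first chain element that is a config key
theorem foldl_char (chain : List String) (l : List (String × List (String × String))) :
    match chain.find? (fun c => l.any (fun p => p.1 == c)) with
    | some c => l.foldl (pvStepI chain) (chain.length, []) = (pvRk chain c, (List.lookup c l).getD [])
    | none => l.foldl (pvStepI chain) (chain.length, []) = (chain.length, []) := by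
  induction chain with
  | nil => simpa using foldl_fix_zero [] l []
  | cons c rest ih =>
    by_cases h : l.any (fun p => p.1 == c)
    · obtain ⟨q, hq⟩ := Option.isSome_iff_exists.mp (by
        rw [List.find?_isSome]
        exact List.any_eq_true.mp h)
      rw [List.find?_cons_of_pos (by simpa using h)]
      dsimp only
      rw [show (c :: rest).length = rest.length + 1 from rfl]
      rw [foldl_hit c rest l q hq _ _ (Nat.succ_pos _), rank_cons_self]
      rw [find?_eq_lookup c l q hq]
      rfl
    · have hc : ∀ p ∈ l, p.1 ≠ c := by
        intro p hp he
        exact h (List.any_eq_true.mpr ⟨p, hp, by simp [he]⟩)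
      rw [List.find?_cons_of_neg (by simpa using h)]
      rw [show (c :: rest).length = rest.length + 1 from rfl, foldl_shift c rest l hc]
      rcases hf : rest.find? (fun x => l.any fun p => p.1 == x) with _ | d
      · rw [hf] at ih
        dsimp only
        rw [ih]
      · rw [hf] at ih
        dsimp only
        rw [ih]
        have hd : d ≠ c := by
          intro he
          have := List.find?_some hf
          rw [he] at this
          exact h this
        rw [rank_cons_ne c rest d hd]

theorem Aform_eq_Bcore (chain : List String) (l : List (String × List (String × String))) :
    pvAform l chain =
      (if ((l.foldl (pvStepI chain) (chain.length, [])).1 == chain.length) then "unknown/unknown"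
       else pvFmt (l.foldl (pvStepI chain) (chain.length, [])).2) := by
  have hchar := foldl_char chain l
  rcases hf : chain.find? (fun c => l.any (fun p => p.1 == c)) with _ | c
  · rw [hf] at hchar
    simp [pvAform, hf, hchar]
  · rw [hf] at hchar
    have hmem : c ∈ chain := List.mem_of_find?_eq_some hf
    have hlt : pvRk chain c < chain.length := rank_lt_of_mem chain c hmem
    simp only [pvAform, hf, hchar]
    rw [if_neg (by simp; omega)]

-- ===== VERDICT =====
theorem format_model_sig_py_spec : Claim_equal_format_model_sig_py := by
  intro models_cfg key fallbacks _
  unfold Spec_format_model_sig_py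
  rw [A_eq_Aform, Aform_eq_Bcore]
  unfold format_model_sig_py_alt pvFmt
  dsimp only
  rw [step_eq]
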